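-- pv_equiv track=rewrite | github.com/mingsm17518/algorithm-solutions | 2026_SDUWH_Star_Pretraining/2025_SDUWH_Star_Remake/04_jump_game_sliding.py | solve_one
-- ===== SOURCE A (Python) =====
-- from collections import deque
--
-- def solve_one(n, k, a):
--     q = deque()
--     q.append((0, 0))
--     cost = 0
--
--     for i in range(1, n + 2):
--         while q and q[0][0] < i - k:
--             q.popleft()
--         if q:
--             cost = max(q[0][1], a[i])
--             while q and q[-1][1] >= cost:
--                 q.pop()
--             q.append((i, cost))
--     return cost
-- ===== SOURCE B (Python) =====
-- def solve_one(n, k, a):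
--     # With no forward jump possible (k <= 0) or no step to take (n < 0) the
--     # answer is 0.  Otherwise every position is reachable, so only the dp
--     # values of the (up to k) most recent positions ever matter; keep exactly
--     # those in a list `win`, newest first: the sliding window minimum is
--     # min(win), and the answer is the freshest entry.  No deque, no validity
--     # tracking, no unbounded history.
--     if k <= 0 or n < 0:
--         return 0
--     win = [0]
--     for i in range(1, n + 2):
--         win = [max(min(win), a[i])] + win[:k - 1]
--     return win[0]
-- ===== Notes on version B (the rewrite author's own statement) =====
-- stated objective: simpler
-- what changed: A's monotonic deque with front/back pops is replaced by a plain list holding the dp values of the last k positions newest-first, rescanned with min() each step; a k<=0 / n<0 guard replaces the deque's empty-window carry-over.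
import Mathlib
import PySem

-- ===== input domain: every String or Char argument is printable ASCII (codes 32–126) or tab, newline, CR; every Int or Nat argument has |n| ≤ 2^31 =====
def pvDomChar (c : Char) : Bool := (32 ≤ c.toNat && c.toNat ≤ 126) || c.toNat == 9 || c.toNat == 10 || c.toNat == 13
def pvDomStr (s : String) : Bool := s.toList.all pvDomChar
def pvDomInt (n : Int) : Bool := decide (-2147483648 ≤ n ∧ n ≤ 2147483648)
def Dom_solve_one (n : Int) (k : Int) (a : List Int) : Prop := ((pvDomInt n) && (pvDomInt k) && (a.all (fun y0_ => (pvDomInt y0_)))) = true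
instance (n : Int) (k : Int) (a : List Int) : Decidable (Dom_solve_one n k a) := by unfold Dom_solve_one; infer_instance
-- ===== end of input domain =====

-- B replaces A's monotonic deque by a plain list of the last k dp values, newest first,
-- rescanned with min each step (simpler; return-value equivalence).

-- ===== PORT A =====
-- loop body of A: pop stale indices from the front, read the window minimum at the
-- front, pop dominated entries from the back, append (i, cost)
def stepA (k : Int) (a : List Int) (s : List (Int × Int) × Int) (i : Int) : List (Int × Int) × Int :=
  match s.1.dropWhile (fun p => decide (p.1 < i - k)) with
  | [] => ([], s.2)
  | p :: rest =>
    let cost := max p.2 (PySem.List.pyGetD a i 0)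
    (((p :: rest).reverse.dropWhile (fun r => decide (cost ≤ r.2))).reverse ++ [(i, cost)], cost)

def solve_one (n : Int) (k : Int) (a : List Int) : Int :=
  ((PySem.List.pyRange 1 (n + 2) 1).foldl (stepA k a) ([(0, 0)], 0)).2

-- ===== PORT B =====
-- B's loop, one recursive call per remaining index: prepend max(min(win), a[i]) to the
-- newest-first window list, keeping only its first k entries
def loopB (k : Int) (a : List Int) : Nat → Int → List Int → List Int
  | 0, _, win => win
  | m + 1, i, win =>
      loopB k a m (i + 1)
        (max ((PySem.List.min? win (fun x => x)).getD 0) (PySem.List.pyGetD a i 0)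
          :: PySem.List.slice win none (some (k - 1)))

def solve_one_alt (n : Int) (k : Int) (a : List Int) : Int :=
  if k ≤ 0 ∨ n < 0 then 0
  else (loopB k a (n + 1).toNat 1 [0]).headD 0

-- ===== PRECONDITION & SPEC =====
-- Pre_ excludes exactly the inputs where A raises IndexError: with k ≥ 1 and 0 ≤ n the loop
-- reads a[1..n+1], so it needs n + 2 ≤ len(a); with k ≤ 0 or n < 0 the list is never indexed.
def Pre_solve_one (n : Int) (k : Int) (a : List Int) : Prop :=
  k ≤ 0 ∨ n < 0 ∨ n + 2 ≤ (a.length : Int)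
instance (n : Int) (k : Int) (a : List Int) : Decidable (Pre_solve_one n k a) := by
  unfold Pre_solve_one; infer_instance

def pvWitness_solve_one : Int × Int × List Int := (2, 1, [0, 3, 1, 2])

def Spec_solve_one (n : Int) (k : Int) (a : List Int) (out : Int) : Prop := out = solve_one_alt n k a
instance (n : Int) (k : Int) (a : List Int) (out : Int) : Decidable (Spec_solve_one n k a out) := by
  unfold Spec_solve_one; infer_instance

-- ===== CLAIM (what is proved, stated in full; the proofs are below) =====
def Claim_equal_solve_one : Prop := ∀ (n : Int) (k : Int) (a : List Int), Dom_solve_one n k a → Pre_solve_one n k a → Spec_solve_one n k a (solve_one n k a)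

-- ===== LEMMAS AND PROOFS =====

-- proof-side ghost: the dp list in FORWARD order with the running cost; both ports are related
-- to a fold of this step function
def stepG (k : Int) (a : List Int) (s : List Int × Int) (i : Int) : List Int × Int :=
  match PySem.List.min? (PySem.List.slice s.1 (some (max 0 (i - k))) (some i)) (fun x => x) with
  | none => s
  | some m =>
    let cost := max m (PySem.List.pyGetD a i 0)
    (s.1 ++ [cost], cost)

-- dropWhile = filter when the tested property is closed towards the front of a sorted list
lemma dropWhile_eq_filter_not {α : Type} {R : α → α → Prop} {p : α → Bool} :
    ∀ {l : List α}, l.Pairwise R → (∀ x y, R x y → p y = true → p x = true) →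
      l.dropWhile p = l.filter (fun x => !p x) := by
  intro l hl h
  induction l with
  | nil => rfl
  | cons x t ih =>
    rcases List.pairwise_cons.1 hl with ⟨hxt, ht⟩
    cases hp : p x with
    | true =>
      simp [hp, ih ht]
    | false =>
      have hall : ∀ y ∈ t, p y = false := by
        intro y hy
        cases hpy : p y with
        | false => rfl
        | true => exact absurd (h x y (hxt y hy) hpy) (by simp [hp])
      simp [hp]
      exact (List.filter_eq_self.2 (by intro y hy; simp [hall y hy])).symm

-- the candidate predicate: j is in the window (lo ≤ j) and dp[j] is strictly below every later dp value up to m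
def candP (dp : List Int) (lo : Int) (m j : Nat) : Bool :=
  decide (lo ≤ (j : Int)) &&
    (List.range (m + 1)).all (fun l => decide (l ≤ j) || decide (dp.getD j 0 < dp.getD l 0))

-- the exact contents of A's deque after processing index m, expressed from the ghost dp list
def cand (dp : List Int) (lo : Int) (m : Nat) : List (Int × Int) :=
  ((List.range (m + 1)).filter (candP dp lo m)).map (fun (j : Nat) => ((j : Int), dp.getD j 0))

lemma candP_lo {dp : List Int} {lo : Int} {m j : Nat} (h : candP dp lo m j = true) :
    lo ≤ (j : Int) := by
  rw [candP] at h
  simp only [Bool.and_eq_true, decide_eq_true_eq] at h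
  exact h.1

lemma candP_lt {dp : List Int} {lo : Int} {m j j' : Nat} (h : candP dp lo m j = true)
    (hlt : j < j') (hle : j' ≤ m) : dp.getD j 0 < dp.getD j' 0 := by
  rw [candP] at h
  simp only [Bool.and_eq_true] at h
  have hall := List.all_eq_true.mp h.2
  have := hall j' (List.mem_range.mpr (by omega))
  simp only [Bool.or_eq_true, decide_eq_true_eq] at this
  rcases this with h1 | h2
  · omega
  · exact h2

lemma candP_of (dp : List Int) (lo : Int) (m j : Nat) (h1 : lo ≤ (j : Int))
    (h2 : ∀ l, j < l → l ≤ m → dp.getD j 0 < dp.getD l 0) : candP dp lo m j = true := by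
  rw [candP, Bool.and_eq_true]
  refine ⟨by simpa using h1, List.all_eq_true.mpr ?_⟩
  intro l hl
  simp only [Bool.or_eq_true, decide_eq_true_eq]
  by_cases hc : l ≤ j
  · exact Or.inl hc
  · exact Or.inr (h2 l (by omega) (Nat.lt_succ_iff.mp (List.mem_range.mp hl)))

lemma cand_pairwise_fst (dp : List Int) (lo : Int) (m : Nat) :
    (cand dp lo m).Pairwise (fun x y => x.1 < y.1) := by
  rw [cand, List.pairwise_map]
  refine (((List.pairwise_lt_range).sublist (List.filter_sublist ..)).imp ?_)
  intro a b h
  simpa using (by exact_mod_cast h : (a : Int) < (b : Int))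

lemma cand_pairwise_snd (dp : List Int) (lo : Int) (m : Nat) :
    (cand dp lo m).Pairwise (fun x y => x.2 < y.2) := by
  rw [cand, List.pairwise_map]
  refine List.Pairwise.imp_of_mem ?_
    ((List.pairwise_lt_range).sublist (List.filter_sublist ..))
  intro j j' hj hj' hlt
  have hPj := (List.mem_filter.mp hj).2
  have hj'm : j' ≤ m := Nat.lt_succ_iff.mp (List.mem_range.mp (List.mem_filter.mp hj').1)
  exact candP_lt hPj hlt hj'm

-- front pops tighten the lower bound
lemma cand_dropWhile (dp : List Int) (m : Nat) (lo₁ lo₂ : Int) (h : lo₁ ≤ lo₂) :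
    (cand dp lo₁ m).dropWhile (fun p => decide (p.1 < lo₂)) = cand dp lo₂ m := by
  rw [dropWhile_eq_filter_not (cand_pairwise_fst dp lo₁ m)
    (by intro x y hxy hy; simp only [decide_eq_true_eq] at *; omega)]
  rw [cand, List.filter_map, cand, List.filter_filter]
  congr 1
  apply List.filter_congr
  intro j hj
  have hjm : j ≤ m := Nat.lt_succ_iff.mp (List.mem_range.mp hj)
  by_cases h1 : candP dp lo₁ m j = true
  · by_cases h2 : lo₂ ≤ (j : Int)
    · have : candP dp lo₂ m j = true :=
        candP_of dp lo₂ m j h2 (fun l hl hlm => candP_lt h1 hl hlm)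
      simp only [Function.comp, this, h1]
      simp; omega
    · have : candP dp lo₂ m j = false := by
        cases hc : candP dp lo₂ m j
        · rfl
        · exact absurd (candP_lo hc) h2
      simp only [Function.comp, this, h1]
      simp; omega
  · have h1' : candP dp lo₁ m j = false := by simpa using h1
    have : candP dp lo₂ m j = false := by
      cases hc : candP dp lo₂ m j
      · rfl
      · refine absurd (candP_of dp lo₁ m j (le_trans h (candP_lo hc))
          (fun l hl hlm => candP_lt hc hl hlm)) (by simp [h1'])
    simp [Function.comp, this, h1']

-- the last argmin of the window: strictly below everything after it, minimal on the window
lemma exists_j0 (dp : List Int) (lo : Nat) :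
    ∀ m : Nat, lo ≤ m →
      ∃ j0, lo ≤ j0 ∧ j0 ≤ m ∧
        (∀ l, j0 < l → l ≤ m → dp.getD j0 0 < dp.getD l 0) ∧
        (∀ l, lo ≤ l → l ≤ m → dp.getD j0 0 ≤ dp.getD l 0) := by
  intro m
  induction m with
  | zero =>
    intro h0
    have hlo : lo = 0 := Nat.le_zero.mp h0
    subst hlo
    exact ⟨0, le_refl 0, le_refl 0,
      fun l hl hl' => absurd hl (by omega),
      fun l hl hl' => le_of_eq (by rw [Nat.le_zero.mp hl'])⟩
  | succ m ih =>
    intro h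
    by_cases hm : lo ≤ m
    · obtain ⟨j0, h1, h2, h3, h4⟩ := ih hm
      by_cases hcmp : dp.getD j0 0 < dp.getD (m + 1) 0
      · refine ⟨j0, h1, h2.trans (Nat.le_succ m), ?_, ?_⟩
        · intro l hl hl'
          rcases Nat.lt_succ_iff_lt_or_eq.mp (Nat.lt_succ_of_le hl') with hc | hc
          · exact h3 l hl (by omega)
          · rw [hc]; exact hcmp
        · intro l hl hl'
          rcases Nat.lt_succ_iff_lt_or_eq.mp (Nat.lt_succ_of_le hl') with hc | hc
          · exact h4 l hl (by omega)
          · rw [hc]; exact le_of_lt hcmp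
      · refine ⟨m + 1, by omega, le_refl _, fun l hl hl' => absurd hl (by omega), ?_⟩
        intro l hl hl'
        rcases Nat.lt_succ_iff_lt_or_eq.mp (Nat.lt_succ_of_le hl') with hc | hc
        · exact le_trans (by omega) (h4 l hl (by omega))
        · rw [hc]
    · have hlo : lo = m + 1 := by omega
      refine ⟨m + 1, by omega, le_refl _, fun l hl hl' => absurd hl (by omega), ?_⟩
      intro l hl hl'
      have : l = m + 1 := by omega
      simp [this]

-- appending the fresh index: back pops + append rebuild cand of the extended dp list
lemma candP_append (dp : List Int) (m : Nat) (lo cost : Int) (hlen : dp.length = m + 1)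
    (j : Nat) (hj : j ≤ m) :
    candP (dp ++ [cost]) lo (m + 1) j = (candP dp lo m j && decide (dp.getD j 0 < cost)) := by
  have hA : ∀ l : Nat, l ≤ m → (dp ++ [cost]).getD l 0 = dp.getD l 0 := by
    intro l hl
    simp [List.getD_eq_getElem?_getD, List.getElem?_append_left (show l < dp.length by omega)]
  have hB : (dp ++ [cost]).getD (m + 1) 0 = cost := by
    have h := List.getElem?_concat_length (l := dp) (a := cost)
    rw [hlen] at h
    simp [List.getD_eq_getElem?_getD, h]
  rw [Bool.eq_iff_iff]
  constructor
  · intro h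
    rw [Bool.and_eq_true]
    refine ⟨candP_of dp lo m j (candP_lo h) ?_, ?_⟩
    · intro l hl hlm
      have := candP_lt h hl (by omega)
      rwa [hA j hj, hA l hlm] at this
    · have := candP_lt h (by omega : j < m + 1) (le_refl _)
      rw [hA j hj, hB] at this
      simpa using this
  · intro h
    rw [Bool.and_eq_true] at h
    refine candP_of _ lo (m + 1) j (candP_lo h.1) ?_
    intro l hl hlm
    rcases Nat.lt_succ_iff_lt_or_eq.mp (Nat.lt_succ_of_le hlm) with hc | hc
    · rw [hA j hj, hA l (by omega)]
      exact candP_lt h.1 hl (by omega)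
    · rw [hA j hj, hc, hB]
      simpa using h.2

lemma cand_append (dp : List Int) (m : Nat) (lo cost : Int) (hlen : dp.length = m + 1)
    (hlo : lo ≤ (m : Int) + 1) :
    (cand dp lo m).filter (fun r => decide (r.2 < cost)) ++ [(((m : Int) + 1), cost)]
      = cand (dp ++ [cost]) lo (m + 1) := by
  have hB : (dp ++ [cost]).getD (m + 1) 0 = cost := by
    have h := List.getElem?_concat_length (l := dp) (a := cost)
    rw [hlen] at h
    simp [List.getD_eq_getElem?_getD, h]
  conv_rhs => rw [cand, List.range_succ, List.filter_append, List.map_append]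
  conv_lhs => rw [cand, List.filter_map, List.filter_filter]
  congr 1
  · -- the surviving old entries
    have hflt : List.filter (candP (dp ++ [cost]) lo (m + 1)) (List.range (m + 1))
        = List.filter (fun j => decide (dp.getD j 0 < cost) && candP dp lo m j)
            (List.range (m + 1)) := by
      apply List.filter_congr
      intro j hj
      rw [candP_append dp m lo cost hlen j (Nat.lt_succ_iff.mp (List.mem_range.mp hj))]
      rw [Bool.and_comm]
    rw [hflt]
    apply List.map_congr_left
    intro j hj
    have hjm : j ≤ m := Nat.lt_succ_iff.mp (List.mem_range.mp (List.mem_filter.mp hj).1)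
    simp [List.getD_eq_getElem?_getD, List.getElem?_append_left (show j < dp.length by omega)]
  · -- the freshly appended entry
    have hnew : candP (dp ++ [cost]) lo (m + 1) (m + 1) = true := by
      refine candP_of _ lo (m + 1) (m + 1) (by push_cast; omega) ?_
      intro l hl hlm
      omega
    simp [hnew]
    rw [← List.getD_eq_getElem?_getD, hB]

-- the one-step simulation: from state (cand dp (m-k) m, ·) vs (dp, ·), A's loop body and the
-- ghost step produce the same cost, A's new deque is again cand of the extended dp list, and the
-- cost is what B computes from the reversed list: max(min(rdp[:k]), a[i])
lemma step_main (k : Int) (a : List Int) (hk : 1 ≤ k) (m : Nat) (dp : List Int) (c c₂ : Int)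
    (hlen : dp.length = m + 1) :
    ∃ cost : Int,
      stepG k a (dp, c) ((m : Int) + 1) = (dp ++ [cost], cost) ∧
      stepA k a (cand dp ((m : Int) - k) m, c₂) ((m : Int) + 1)
        = (cand (dp ++ [cost]) ((m : Int) + 1 - k) (m + 1), cost) ∧
      cost = max ((PySem.List.min? (PySem.List.slice dp.reverse none (some k)) (fun x => x)).getD 0)
                 (PySem.List.pyGetD a ((m : Int) + 1) 0) := by
  have hkern : ((m : Int) + 1 - k).toNat ≤ m := by omega
  set lo : Int := (m : Int) + 1 - k with hlo
  set loN : Nat := lo.toNat with hloN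
  -- the window the ghost rescans
  set W : List Int := dp.drop loN with hWdef
  have hWlen : W.length = m + 1 - loN := by rw [hWdef, List.length_drop, hlen]
  have hWne : W ≠ [] := by
    intro hnil
    rw [hnil] at hWlen
    simp at hWlen
    omega
  obtain ⟨w, t, hW⟩ := List.exists_cons_of_ne_nil hWne
  set minv : Int := t.foldl min w with hminv
  set cost : Int := max minv (PySem.List.pyGetD a ((m : Int) + 1) 0) with hcost
  -- min facts about the window
  have hmin_le : ∀ y ∈ W, minv ≤ y := by
    rw [hW]
    intro y hy
    rcases List.mem_cons.mp hy with rfl | hy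
    · exact (PySem.List.foldl_min_le t y).1
    · exact (PySem.List.foldl_min_le t w).2 y hy
  have hmin_mem : minv ∈ W := by
    rw [hW]
    rcases PySem.List.foldl_min_mem t w with h | h
    · rw [hminv, h]; exact List.mem_cons_self
    · exact List.mem_cons_of_mem w h
  -- translating window membership to dp indices
  have hWget : ∀ j : Nat, loN ≤ j → j ≤ m → dp.getD j 0 ∈ W := by
    intro j hj hjm
    have hjl : j < dp.length := by omega
    have hgi : j - loN < W.length := by omega
    have : W[j - loN]'hgi = dp[j]'hjl := by
      simp only [hWdef, List.getElem_drop]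
      congr 1
      omega
    rw [List.getD_eq_getElem _ _ hjl, ← this]
    exact List.getElem_mem _
  have hmin_all : ∀ j : Nat, loN ≤ j → j ≤ m → minv ≤ dp.getD j 0 :=
    fun j hj hjm => hmin_le _ (hWget j hj hjm)
  have hWmem_idx : ∃ jm : Nat, loN ≤ jm ∧ jm ≤ m ∧ dp.getD jm 0 = minv := by
    obtain ⟨u, hu, hWu⟩ := List.getElem_of_mem hmin_mem
    refine ⟨loN + u, by omega, by omega, ?_⟩
    have hjl : loN + u < dp.length := by omega
    rw [List.getD_eq_getElem _ _ hjl, ← hWu]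
    simp only [hWdef, List.getElem_drop]
  obtain ⟨jm, hjm1, hjm2, hjm3⟩ := hWmem_idx
  -- the ghost step
  have hslice : PySem.List.slice dp (some (max 0 ((m : Int) + 1 - k))) (some ((m : Int) + 1)) = W := by
    rw [PySem.List.slice_toNat dp (le_max_left _ _) (by omega)]
    have e1 : (max 0 ((m : Int) + 1 - k)).toNat = loN := by omega
    have e2 : ((m : Int) + 1).toNat = m + 1 := by omega
    rw [e1, e2, hWdef]
    exact List.take_of_length_le (le_of_eq (by rw [List.length_drop, hlen]))
  have hminW : PySem.List.min? W (fun x => x) = some minv := by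
    rw [hW]; exact PySem.List.min?_id_cons ..
  have hG : stepG k a (dp, c) ((m : Int) + 1) = (dp ++ [cost], cost) := by
    rw [stepG]
    simp only [hslice, hminW]
    rfl
  -- B's cost from the reversed list: rdp[:k] is the reversed window
  have hrev : PySem.List.slice dp.reverse none (some k) = W.reverse := by
    rw [PySem.List.slice_to dp.reverse (by omega)]
    rw [hWdef]
    by_cases hks : k.toNat ≤ dp.length
    · have he : dp.length - k.toNat = loN := by omega
      rw [List.take_reverse, he]
    · have h0 : loN = 0 := by omega
      rw [List.take_of_length_le (by simp; omega), h0, List.drop_zero]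
  have hBcost : cost = max ((PySem.List.min? (PySem.List.slice dp.reverse none (some k)) (fun x => x)).getD 0)
      (PySem.List.pyGetD a ((m : Int) + 1) 0) := by
    rw [hrev]
    have hv : (PySem.List.min? W.reverse (fun x => x)).getD 0 = minv := by
      obtain ⟨w', t', hW'⟩ := List.exists_cons_of_ne_nil
        (show W.reverse ≠ [] by simp [hWne])
      rw [hW', PySem.List.min?_id_cons, Option.getD_some]
      have hm1 : t'.foldl min w' ∈ W := by
        rw [← List.mem_reverse, hW']
        rcases PySem.List.foldl_min_mem t' w' with h | h
        · rw [h]; exact List.mem_cons_self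
        · exact List.mem_cons_of_mem w' h
      have hm2 : ∀ y ∈ W, t'.foldl min w' ≤ y := by
        intro y hy
        rw [← List.mem_reverse, hW'] at hy
        rcases List.mem_cons.mp hy with rfl | hy
        · exact (PySem.List.foldl_min_le t' y).1
        · exact (PySem.List.foldl_min_le t' w').2 y hy
      exact le_antisymm (hm2 minv hmin_mem) (hmin_le _ hm1)
    rw [hv]
  refine ⟨cost, hG, ?_, hBcost⟩
  -- A's step: front pops
  have hfront : (cand dp ((m : Int) - k) m).dropWhile
      (fun p => decide (p.1 < ((m : Int) + 1) - k)) = cand dp lo m :=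
    cand_dropWhile dp m _ _ (by omega)
  -- the head of the popped deque carries the window minimum
  obtain ⟨j0, hj01, hj02, hj03, hj04⟩ := exists_j0 dp loN m hkern
  have hj0lo : lo ≤ (j0 : Int) := by omega
  have hj0P : candP dp lo m j0 = true := candP_of dp lo m j0 hj0lo hj03
  set F : List Nat := (List.range (m + 1)).filter (candP dp lo m) with hF
  have hj0F : j0 ∈ F := by
    rw [hF]
    exact List.mem_filter.mpr ⟨List.mem_range.mpr (by omega), hj0P⟩
  obtain ⟨jh, restf, hFc⟩ := List.exists_cons_of_ne_nil (List.ne_nil_of_mem hj0F)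
  have hjhF : jh ∈ F := by rw [hFc]; exact List.mem_cons_self
  have hjhP : candP dp lo m jh = true := (List.mem_filter.mp (hF ▸ hjhF)).2
  have hjhm : jh ≤ m :=
    Nat.lt_succ_iff.mp (List.mem_range.mp (List.mem_filter.mp (hF ▸ hjhF)).1)
  have hpairF : F.Pairwise (· < ·) :=
    (List.pairwise_lt_range).sublist (hF ▸ List.filter_sublist ..)
  have hjh_le : jh ≤ j0 := by
    rw [hFc] at hj0F hpairF
    rcases List.mem_cons.mp hj0F with hc | hc
    · omega
    · exact le_of_lt ((List.pairwise_cons.mp hpairF).1 j0 hc)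
  have hjh : jh = j0 := by
    by_contra hne
    have hlt : jh < j0 := by omega
    have h1 : dp.getD jh 0 < dp.getD j0 0 := candP_lt hjhP hlt hj02
    have h2 : minv ≤ dp.getD jh 0 := hmin_all jh (by have := candP_lo hjhP; omega) hjhm
    have h3 : dp.getD j0 0 = minv :=
      le_antisymm (hjm3 ▸ hj04 jm hjm1 hjm2) (hmin_all j0 hj01 hj02)
    omega
  subst hjh
  have hj0v : dp.getD jh 0 = minv :=
    le_antisymm (hjm3 ▸ hj04 jm hjm1 hjm2) (hmin_all jh hj01 hj02)
  have hq1 : cand dp lo m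
      = ((jh : Int), dp.getD jh 0) :: restf.map (fun (j : Nat) => ((j : Int), dp.getD j 0)) := by
    rw [cand, ← hF, hFc, List.map_cons]
  -- back pops on the strictly increasing values = filter
  have hvp : (cand dp lo m).reverse.Pairwise (fun x y : Int × Int => y.2 < x.2) := by
    rw [List.pairwise_reverse]
    exact cand_pairwise_snd dp lo m
  have htail : ((cand dp lo m).reverse.dropWhile (fun r => decide (cost ≤ r.2))).reverse
      = (cand dp lo m).filter (fun r => decide (r.2 < cost)) := by
    rw [dropWhile_eq_filter_not hvp
      (fun x y hxy hy => by simp only [decide_eq_true_eq] at *; omega)]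
    rw [← List.filter_reverse, List.reverse_reverse]
    apply List.filter_congr
    intro x _
    by_cases h : cost ≤ x.2
    · simp [h]
    · simp [h]
      omega
  have hcm : max (dp.getD jh 0) (PySem.List.pyGetD a ((m : Int) + 1) 0) = cost := by
    rw [hj0v]
  rw [stepA]
  simp only [hfront, hq1]
  simp only [← hq1, hcm]
  rw [htail, cand_append dp m lo cost hlen (by omega)]

-- the loop invariant relating A's fold to the ghost fold, by induction on the number of
-- processed indices; also: the ghost dp list has length m+1 and its last entry is the cost
lemma inv_main (k : Int) (a : List Int) (hk : 1 ≤ k) (m : Nat) :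
    (((List.range m).map (fun (t : Nat) => (1 : Int) + (t : Int))).foldl (stepA k a) ([(0, 0)], 0)).1
        = cand (((List.range m).map (fun (t : Nat) => (1 : Int) + (t : Int))).foldl (stepG k a) ([0], 0)).1
            ((m : Int) - k) m
      ∧ (((List.range m).map (fun (t : Nat) => (1 : Int) + (t : Int))).foldl (stepA k a) ([(0, 0)], 0)).2
        = (((List.range m).map (fun (t : Nat) => (1 : Int) + (t : Int))).foldl (stepG k a) ([0], 0)).2
      ∧ (((List.range m).map (fun (t : Nat) => (1 : Int) + (t : Int))).foldl (stepG k a) ([0], 0)).1.length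
        = m + 1
      ∧ (((List.range m).map (fun (t : Nat) => (1 : Int) + (t : Int))).foldl (stepG k a) ([0], 0)).1.getLastD 0
        = (((List.range m).map (fun (t : Nat) => (1 : Int) + (t : Int))).foldl (stepG k a) ([0], 0)).2 := by
  induction m with
  | zero =>
    refine ⟨?_, rfl, rfl, rfl⟩
    have hP : candP [0] ((0 : Nat) - k) 0 0 = true :=
      candP_of _ _ _ _ (by push_cast; omega) (fun l hl hl' => by omega)
    rw [Nat.cast_zero, zero_sub] at hP
    simp [cand, List.range_one, List.filter, hP]
  | succ m ih =>
    obtain ⟨hq, hc, hlen, hlast⟩ := ih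
    obtain ⟨cost, hG, hA, hBc⟩ := step_main k a hk m
      (((List.range m).map (fun (t : Nat) => (1 : Int) + (t : Int))).foldl (stepG k a) ([0], 0)).1
      (((List.range m).map (fun (t : Nat) => (1 : Int) + (t : Int))).foldl (stepG k a) ([0], 0)).2
      (((List.range m).map (fun (t : Nat) => (1 : Int) + (t : Int))).foldl (stepA k a) ([(0, 0)], 0)).2
      hlen
    have hcast : ((1 : Int) + (m : Nat)) = (m : Int) + 1 := by ring
    rw [List.range_succ, List.map_append, List.foldl_append, List.foldl_append]
    simp only [List.map_cons, List.map_nil, List.foldl_cons, List.foldl_nil, hcast]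
    have hSA : (((List.range m).map (fun (t : Nat) => (1 : Int) + (t : Int))).foldl (stepA k a) ([(0, 0)], 0))
        = (cand (((List.range m).map (fun (t : Nat) => (1 : Int) + (t : Int))).foldl (stepG k a) ([0], 0)).1
            ((m : Int) - k) m,
           (((List.range m).map (fun (t : Nat) => (1 : Int) + (t : Int))).foldl (stepA k a) ([(0, 0)], 0)).2) := by
      exact Prod.ext hq rfl
    have hSG : (((List.range m).map (fun (t : Nat) => (1 : Int) + (t : Int))).foldl (stepG k a) ([0], 0))
        = ((((List.range m).map (fun (t : Nat) => (1 : Int) + (t : Int))).foldl (stepG k a) ([0], 0)).1,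
           (((List.range m).map (fun (t : Nat) => (1 : Int) + (t : Int))).foldl (stepG k a) ([0], 0)).2) := rfl
    rw [hSA, hSG, hG, hA]
    refine ⟨?_, rfl, by simp [hlen], by simp⟩
    have : ((m + 1 : Nat) : Int) - k = (m : Int) + 1 - k := by push_cast; ring
    rw [this]

-- one step of the window list: prepending the new cost and truncating to k entries is the
-- k-prefix of the extended dp list's reverse
lemma window_step (k : Int) (dp : List Int) (cost : Int) (hk : 1 ≤ k) :
    cost :: PySem.List.slice (PySem.List.slice dp.reverse none (some k)) none (some (k - 1))
      = PySem.List.slice (dp ++ [cost]).reverse none (some k) := by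
  obtain ⟨j, hj⟩ : ∃ j, k.toNat = j + 1 := ⟨k.toNat - 1, by omega⟩
  rw [PySem.List.slice_to _ (by omega : (0:Int) ≤ k - 1),
      PySem.List.slice_to _ (by omega : (0:Int) ≤ k),
      PySem.List.slice_to _ (by omega : (0:Int) ≤ k)]
  rw [List.take_take, List.reverse_append, List.reverse_singleton, List.singleton_append, hj,
      List.take_succ_cons]
  have hmin : min (k - 1).toNat (j + 1) = j := by omega
  rw [hmin]

-- the bridge: B's window recursion computes the k-prefix of the reverse of the ghost dp list
lemma loopB_G (k : Int) (a : List Int) (hk : 1 ≤ k) :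
    ∀ (m : Nat) (dp : List Int) (c : Int), 1 ≤ dp.length →
      loopB k a m ((dp.length : Nat) : Int) (PySem.List.slice dp.reverse none (some k))
        = PySem.List.slice
            ((((List.range m).map (fun (t : Nat) => ((dp.length : Nat) : Int) + (t : Int))).foldl
              (stepG k a) (dp, c)).1.reverse) none (some k) := by
  intro m
  induction m with
  | zero => intro dp c _; rfl
  | succ m ih =>
    intro dp c hdp
    set mm : Nat := dp.length - 1 with hmm
    have hlen : dp.length = mm + 1 := by omega
    obtain ⟨cost, hG, _, hBc⟩ := step_main k a hk mm dp c c hlen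
    have hcast : ((dp.length : Nat) : Int) = (mm : Int) + 1 := by
      rw [hlen]; push_cast; ring
    -- one unfolding of B's recursion computes exactly the ghost step's cost
    have hL : loopB k a (m + 1) ((dp.length : Nat) : Int)
          (PySem.List.slice dp.reverse none (some k))
        = loopB k a m (((dp.length : Nat) : Int) + 1)
            (PySem.List.slice (dp ++ [cost]).reverse none (some k)) := by
      rw [loopB, ← window_step k dp cost hk]
      congr 2
      rw [hcast, ← hBc]
    rw [hL]
    -- the ghost side consumes the same first index
    rw [List.range_succ_eq_map, List.map_cons, List.foldl_cons]
    rw [show ((dp.length : Nat) : Int) + ((0 : Nat) : Int) = (mm : Int) + 1 by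
      rw [hcast]; push_cast; ring]
    rw [hG]
    have hml : (dp ++ [cost]).length = dp.length + 1 := by simp
    have hargs : (((dp.length : Nat) : Int) + 1) = (((dp ++ [cost]).length : Nat) : Int) := by
      rw [hml]; push_cast; ring
    have hmap : (List.range m).map ((fun (t : Nat) => ((dp.length : Nat) : Int) + (t : Int)) ∘ Nat.succ)
        = (List.range m).map (fun (t : Nat) => (((dp ++ [cost]).length : Nat) : Int) + (t : Int)) := by
      apply List.map_congr_left
      intro t _
      simp only [Function.comp, hml]
      push_cast
      ring
    rw [List.map_map, hmap, hargs]
    exact ih (dp ++ [cost]) cost (by simp)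

-- the head of a nonempty prefix is the head of the list
lemma headD_take (l : List Int) (j : Nat) (hj : 1 ≤ j) : (l.take j).headD 0 = l.headD 0 := by
  obtain ⟨j', rfl⟩ : ∃ j', j = j' + 1 := ⟨j - 1, by omega⟩
  cases l with
  | nil => rfl
  | cons x t => rw [List.take_succ_cons]; rfl

-- k ≤ 0: A's deque is emptied at i = 1 and stays empty
lemma foldA_empty (k : Int) (a : List Int) :
    ∀ (l : List Int) (c : Int), l.foldl (stepA k a) ([], c) = ([], c) := by
  intro l
  induction l with
  | nil => intro c; rfl
  | cons i t ih => intro c; simpa [stepA] using ih c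

-- with k ≤ 0 the first front pop empties A's deque for good
lemma foldA_zero (k : Int) (a : List Int) (hk : k ≤ 0) :
    ∀ l : List Int, (∀ i ∈ l, 1 ≤ i) → (l.foldl (stepA k a) ([(0, 0)], 0)).2 = 0 := by
  intro l
  cases l with
  | nil => intro _; rfl
  | cons i t =>
    intro hall
    have hi : 1 ≤ i := hall i (by simp)
    have hstep : stepA k a ([(0, 0)], 0) i = ([], 0) := by
      have h1 : List.dropWhile (fun (p : Int × Int) => decide (p.1 < i - k)) [(0, 0)]
          = ([] : List (Int × Int)) := by
        rw [List.dropWhile_cons]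
        simp only [decide_eq_true_eq]
        rw [if_pos (by omega)]
        rfl
      rw [stepA]
      simp only [h1]
    rw [List.foldl_cons, hstep, foldA_empty]

-- ===== VERDICT (by name: the statement is the Claim_ definition above) =====
theorem solve_one_spec : Claim_equal_solve_one := by
  unfold Claim_equal_solve_one
  intro n k a _hdom _hpre
  unfold Spec_solve_one
  by_cases hk : k ≤ 0
  · rw [solve_one, solve_one_alt, if_pos (Or.inl hk), PySem.List.pyRange_one]
    refine foldA_zero k a hk _ ?_
    intro i hi
    obtain ⟨t, _, rfl⟩ := List.mem_map.mp hi
    omega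
  · by_cases hn : n < 0
    · rw [solve_one, solve_one_alt, if_pos (Or.inr hn), PySem.List.pyRange_one]
      have h0 : (n + 2 - 1).toNat = 0 := by omega
      rw [h0]
      rfl
    · rw [solve_one, solve_one_alt, if_neg (by push Not; omega), PySem.List.pyRange_one]
      have hm : n + 2 - 1 = n + 1 := by ring
      rw [hm]
      obtain ⟨_, hc, hlen, hlast⟩ := inv_main k a (by omega) (n + 1).toNat
      have hbridge := loopB_G k a (by omega) (n + 1).toNat [0] 0 (by simp)
      have h01 : PySem.List.slice ([0] : List Int).reverse none (some k) = [0] := by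
        rw [List.reverse_singleton, PySem.List.slice_to _ (by omega : (0:Int) ≤ k)]
        exact List.take_of_length_le (by simp; omega)
      rw [h01] at hbridge
      norm_num at hbridge
      rw [hbridge, PySem.List.slice_to _ (by omega : (0:Int) ≤ k),
        headD_take _ _ (by omega), List.headD_eq_head?_getD, List.head?_reverse,
        ← List.getLastD_eq_getLast?, hlast, hc]
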